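-- pv_equiv track=rewrite | github.com/KimYeong-su/programmers | python/SummerWinter_Coding(~2018)/geographicEditing.py | solution
-- ===== SOURCE A (Python) =====
-- def solution(land, P, Q):
--     base = []
--     for l in land:
--         base+=l
--     base.sort()
--     n = len(base)
--     cost = (sum(base) - base[0]*n) * Q
--     answer = cost
--     for i in range(1,n):
--         if base[i] != base[i-1]:
--             cost = cost + ((base[i] - base[i-1]) * i * P) - ((base[i] - base[i-1])*(n-i) * Q)
--             if answer < cost:
--                 break
--             answer = min(answer, cost)
--     return answer
-- ===== SOURCE B (Python) =====
-- def solution(land, P, Q):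
--     base = sorted(x for row in land for x in row)
--     n = len(base)
--     prefix = [0]
--     for x in base:
--         prefix.append(prefix[-1] + x)
--     total = prefix[n]
--     cands = [k for k in range(n) if k == 0 or base[k] != base[k - 1]]
--     best = None
--     for k in cands:
--         h = base[k]
--         c = P * (h * k - prefix[k]) + Q * (total - prefix[k] - h * (n - k))
--         if best is not None and best < c:
--             break
--         best = c if best is None else min(best, c)
--     return best
-- ===== Notes on version B (the rewrite author's own statement) =====
-- stated objective: alternative
-- what changed: B replaces A's incremental running-delta update with a prefix-sum table over the sorted heights and computes each distinct-height candidate's total cost independently by a closed-form lookup formula, folding the same min/early-stop rule over a precomputed candidate list; Pre_ excludes the empty flattened grid, on which A raises IndexError (and B returns None, not an int).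
import Mathlib
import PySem

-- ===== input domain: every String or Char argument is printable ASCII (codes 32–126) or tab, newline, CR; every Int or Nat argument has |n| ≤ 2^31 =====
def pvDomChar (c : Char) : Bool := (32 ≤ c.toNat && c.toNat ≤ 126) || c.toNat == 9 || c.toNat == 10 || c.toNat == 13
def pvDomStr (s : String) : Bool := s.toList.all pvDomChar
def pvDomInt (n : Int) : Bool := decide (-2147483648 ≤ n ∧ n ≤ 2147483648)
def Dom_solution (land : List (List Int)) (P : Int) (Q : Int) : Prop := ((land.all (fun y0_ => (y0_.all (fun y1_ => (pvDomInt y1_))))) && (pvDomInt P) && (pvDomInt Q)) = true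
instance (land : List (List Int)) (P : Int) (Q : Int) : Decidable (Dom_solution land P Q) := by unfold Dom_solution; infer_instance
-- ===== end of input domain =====

-- B recomputes each distinct-height candidate's cost from a prefix-sum table by a closed-form
-- formula instead of A's incremental running delta (objective: alternative decomposition).

-- ===== PORT A =====
-- the 'for i in range(1, n)' loop with its break, over the remaining range list; state (cost, answer)
def solutionLoopA (base : List Int) (P Q n : Int) : List Int → Int → Int → Int
  | [], _, answer => answer
  | i :: rest, cost, answer =>
    if PySem.List.pyGetD base i 0 ≠ PySem.List.pyGetD base (i - 1) 0 then
      let cost' := cost + ((PySem.List.pyGetD base i 0 - PySem.List.pyGetD base (i - 1) 0) * i * P)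
                        - ((PySem.List.pyGetD base i 0 - PySem.List.pyGetD base (i - 1) 0) * (n - i) * Q)
      if answer < cost' then answer
      else solutionLoopA base P Q n rest cost' (min answer cost')
    else solutionLoopA base P Q n rest cost answer

def solution (land : List (List Int)) (P : Int) (Q : Int) : Int :=
  let base := PySem.List.sorted (land.foldl (fun acc l => acc ++ l) []) (fun x => x) false
  let n : Int := base.length
  -- base[0] raises IndexError on the empty grid: excluded by Pre_solution
  let cost := (base.sum - PySem.List.pyGetD base 0 0 * n) * Q
  solutionLoopA base P Q n (PySem.List.pyRange 1 n 1) cost cost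

-- ===== PORT B =====
-- prefix = [0]; for x in base: prefix.append(prefix[-1] + x)
def solutionMkPrefix (base : List Int) : List Int :=
  base.foldl (fun pre x => pre ++ [PySem.List.pyGetD pre (-1) 0 + x]) [0]

-- the candidate fold with its break; best : Option Int (None)
def solutionLoopB (base pfx : List Int) (P Q n total : Int) : List Int → Option Int → Option Int
  | [], best => best
  | k :: rest, best =>
    let h := PySem.List.pyGetD base k 0
    let c := P * (h * k - PySem.List.pyGetD pfx k 0)
           + Q * (total - PySem.List.pyGetD pfx k 0 - h * (n - k))
    match best with
    | none => solutionLoopB base pfx P Q n total rest (some c)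
    | some b => if b < c then some b else solutionLoopB base pfx P Q n total rest (some (min b c))

def solution_alt (land : List (List Int)) (P : Int) (Q : Int) : Int :=
  let base := PySem.List.sorted (land.flatMap (fun row => row)) (fun x => x) false
  let n : Int := base.length
  let pfx := solutionMkPrefix base
  let total := PySem.List.pyGetD pfx n 0
  let cands := (PySem.List.pyRange 0 n 1).filter
    (fun k => k == 0 || PySem.List.pyGetD base k 0 != PySem.List.pyGetD base (k - 1) 0)
  -- Python returns best, which is None only on the empty grid (outside Pre_solution)
  (solutionLoopB base pfx P Q n total cands none).getD 0

-- ===== PRECONDITION & SPEC =====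
-- Pre_ excludes exactly the inputs whose flattened grid is empty: there A raises IndexError
-- (base[0]) and B returns None, not an int.
def Pre_solution (land : List (List Int)) (P : Int) (Q : Int) : Prop :=
  land.flatMap (fun row => row) ≠ []
instance (land : List (List Int)) (P : Int) (Q : Int) : Decidable (Pre_solution land P Q) := by
  unfold Pre_solution; infer_instance

def pvWitness_solution : List (List Int) × Int × Int := ([[1, 2], [3, 1]], 2, 3)

def Spec_solution (land : List (List Int)) (P : Int) (Q : Int) (out : Int) : Prop :=
  out = solution_alt land P Q
instance (land : List (List Int)) (P : Int) (Q : Int) (out : Int) : Decidable (Spec_solution land P Q out) := by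
  unfold Spec_solution; infer_instance

-- ===== CLAIM (what is proved, stated in full; the proofs are below) =====
def Claim_equal_solution : Prop := ∀ (land : List (List Int)) (P : Int) (Q : Int),
  Dom_solution land P Q → Pre_solution land P Q → Spec_solution land P Q (solution land P Q)

-- ===== LEMMAS AND PROOFS =====

-- cost of levelling everything to the k-th sorted height, written from pfx sums
def costAt (base : List Int) (P Q : Int) (k : Nat) : Int :=
  P * (base.getD k 0 * k - (base.take k).sum)
  + Q * (base.sum - (base.take k).sum - base.getD k 0 * ((base.length : Int) - k))

theorem foldl_append_eq_flatten (land : List (List Int)) :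
    ∀ acc : List Int, land.foldl (fun acc l => acc ++ l) acc = acc ++ land.flatten := by
  induction land with
  | nil => intro acc; simp
  | cons l ls ih => intro acc; simp [List.foldl_cons, ih]

theorem mkPrefix_eq (base : List Int) :
    solutionMkPrefix base = (List.range (base.length + 1)).map (fun k => (base.take k).sum) := by
  induction base using List.reverseRecOn with
  | nil => simp [solutionMkPrefix, List.range_succ]
  | append_singleton l x ih =>
    unfold solutionMkPrefix at *
    rw [List.foldl_append, ih]
    have hsplit : (List.range (l.length + 1)).map (fun k => (l.take k).sum)
        = (List.range l.length).map (fun k => (l.take k).sum) ++ [l.sum] := by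
      rw [List.range_succ, List.map_append]
      simp
    rw [List.foldl_cons, List.foldl_nil, hsplit, PySem.List.pyGetD_neg_one_append_singleton]
    have hlen : (l ++ [x]).length = l.length + 1 := by simp
    rw [hlen, List.range_succ, List.map_append]
    have h1 : (List.range (l.length + 1)).map (fun k => ((l ++ [x]).take k).sum)
        = (List.range l.length).map (fun k => (l.take k).sum) ++ [l.sum] := by
      rw [← hsplit]
      apply List.map_congr_left
      intro k hk; rw [List.mem_range] at hk
      rw [List.take_append_of_le_length (by omega)]
    rw [h1]
    have h2 : ((l ++ [x]).take (l.length + 1)).sum = l.sum + x := by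
      rw [List.take_of_length_le (by simp)]; simp
    simp [h2]

theorem sum_take_succ (base : List Int) (k : Nat) (hk : k < base.length) :
    (base.take (k + 1)).sum = (base.take k).sum + base.getD k 0 := by
  rw [List.sum_take_succ _ _ hk, List.getD_eq_getElem _ _ hk]

theorem costAt_succ (base : List Int) (P Q : Int) (k : Nat) (hk : k < base.length) :
    costAt base P Q (k + 1) =
      costAt base P Q k
        + (base.getD (k + 1) 0 - base.getD k 0) * ((k : Int) + 1) * P
        - (base.getD (k + 1) 0 - base.getD k 0) * ((base.length : Int) - ((k : Int) + 1)) * Q := by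
  unfold costAt
  rw [sum_take_succ base k hk]
  push_cast
  ring

theorem prefix_getD (base : List Int) (k : Nat) (hk : k ≤ base.length) :
    PySem.List.pyGetD (solutionMkPrefix base) (k : Int) 0 = (base.take k).sum := by
  rw [mkPrefix_eq, PySem.List.pyGetD_natCast]
  have hk2 : k < ((List.range (base.length + 1)).map (fun k => (base.take k).sum)).length := by
    simp; omega
  rw [List.getD_eq_getElem _ _ hk2]
  simp

theorem cand_cost (base : List Int) (P Q : Int) (k : Nat) (hk : k < base.length) :
    P * (PySem.List.pyGetD base (k : Int) 0 * (k : Int) - PySem.List.pyGetD (solutionMkPrefix base) (k : Int) 0)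
      + Q * (PySem.List.pyGetD (solutionMkPrefix base) (base.length : Int) 0
          - PySem.List.pyGetD (solutionMkPrefix base) (k : Int) 0
          - PySem.List.pyGetD base (k : Int) 0 * ((base.length : Int) - (k : Int)))
    = costAt base P Q k := by
  rw [prefix_getD base k (le_of_lt hk), prefix_getD base base.length le_rfl,
    PySem.List.pyGetD_natCast, List.take_length]
  unfold costAt
  ring

theorem loop_eq (base : List Int) (P Q : Int) :
    ∀ (c i : Nat), i + c = base.length → 1 ≤ i → ∀ answer : Int,
      solutionLoopA base P Q (base.length : Int)
        (PySem.List.pyRange (i : Int) (base.length : Int) 1) (costAt base P Q (i - 1)) answer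
      = (solutionLoopB base (solutionMkPrefix base) P Q (base.length : Int)
          (PySem.List.pyGetD (solutionMkPrefix base) (base.length : Int) 0)
          ((PySem.List.pyRange (i : Int) (base.length : Int) 1).filter
            (fun k => k == 0 || PySem.List.pyGetD base k 0 != PySem.List.pyGetD base (k - 1) 0))
          (some answer)).getD 0 := by
  intro c
  induction c with
  | zero =>
    intro i hic hi answer
    have hge : (base.length : Int) ≤ (i : Int) := by exact_mod_cast Nat.le_of_eq (by omega)
    rw [PySem.List.pyRange_one_eq_nil hge]
    simp [solutionLoopA, solutionLoopB]
  | succ c ih =>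
    intro i hic hi answer
    have hilt : i < base.length := by omega
    have hlt : (i : Int) < (base.length : Int) := by exact_mod_cast hilt
    rw [PySem.List.pyRange_one_cons hlt]
    have hbi : PySem.List.pyGetD base (i : Int) 0 = base.getD i 0 := by
      rw [PySem.List.pyGetD_natCast]
    have hbp : PySem.List.pyGetD base ((i : Int) - 1) 0 = base.getD (i - 1) 0 := by
      have h1 : ((i : Int) - 1) = ((i - 1 : Nat) : Int) := by omega
      rw [h1, PySem.List.pyGetD_natCast]
    have hi0 : (((i : Int)) == (0 : Int)) = false := by
      simp; omega
    have hsucc : (i - 1) + 1 = i := by omega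
    have hstep := costAt_succ base P Q (i - 1) (by omega)
    rw [hsucc] at hstep
    have hcast1 : ((i - 1 : Nat) : Int) + 1 = (i : Int) := by omega
    rw [hcast1] at hstep
    have hcast2 : ((i : Int) + 1) = ((i + 1 : Nat) : Int) := by push_cast; ring
    by_cases heq : base.getD i 0 = base.getD (i - 1) 0
    · -- equal adjacent heights: A leaves cost unchanged, B's candidate list skips i
      have hpredf : ¬((((i : Int)) == (0 : Int)) || (PySem.List.pyGetD base (i : Int) 0 != PySem.List.pyGetD base ((i : Int) - 1) 0)) = true := by
        rw [hi0, hbi, hbp, heq]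
        simp
      rw [List.filter_cons, if_neg hpredf]
      have hcost : costAt base P Q i = costAt base P Q (i - 1) := by
        rw [hstep, heq]; ring
      have hA : solutionLoopA base P Q (base.length : Int)
          ((i : Int) :: PySem.List.pyRange ((i : Int) + 1) (base.length : Int) 1)
          (costAt base P Q (i - 1)) answer
          = solutionLoopA base P Q (base.length : Int)
            (PySem.List.pyRange ((i : Int) + 1) (base.length : Int) 1)
            (costAt base P Q (i - 1)) answer := by
        simp only [solutionLoopA]
        rw [if_neg (by rw [hbi, hbp, heq]; simp)]
      rw [hA, hcast2, ← hcost]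
      have := ih (i + 1) (by omega) (by omega) answer
      rw [show (i + 1) - 1 = i from by omega] at this
      exact this
    · -- distinct height: both sides process candidate i with the same cost value
      have hpredt : ((((i : Int)) == (0 : Int)) || (PySem.List.pyGetD base (i : Int) 0 != PySem.List.pyGetD base ((i : Int) - 1) 0)) = true := by
        rw [hi0, hbi, hbp]
        simpa using heq
      rw [List.filter_cons, if_pos hpredt]
      have hcand := cand_cost base P Q i hilt
      rw [hbi] at hcand
      simp only [solutionLoopA, solutionLoopB, hbi, hbp]
      rw [if_pos heq, ← hstep, hcand]
      by_cases hbreak : answer < costAt base P Q i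
      · rw [if_pos hbreak, if_pos hbreak]
        simp
      · rw [if_neg hbreak, if_neg hbreak, hcast2]
        have := ih (i + 1) (by omega) (by omega) (min answer (costAt base P Q i))
        rw [show (i + 1) - 1 = i from by omega] at this
        exact this

-- ===== VERDICT (by name: the statement is the Claim_ definition above) =====
theorem solution_spec : Claim_equal_solution := by
  unfold Claim_equal_solution
  intro land P Q _ hpre
  unfold Spec_solution
  have hbase : land.foldl (fun acc l => acc ++ l) [] = land.flatMap (fun row => row) := by
    rw [foldl_append_eq_flatten land []]
    simp [List.flatMap_def]
  simp only [solution, solution_alt, hbase]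
  set base := PySem.List.sorted (land.flatMap (fun row => row)) (fun x => x) false with hb
  have hne : base ≠ [] := by
    rw [hb, Ne, PySem.List.sorted_eq_nil_iff]; exact hpre
  have hn : 0 < base.length := List.length_pos_iff.mpr hne
  have h0n : (0 : Int) < (base.length : Int) := by exact_mod_cast hn
  have hc0 : (base.sum - PySem.List.pyGetD base 0 0 * (base.length : Int)) * Q = costAt base P Q 0 := by
    unfold costAt
    rw [PySem.List.pyGetD_zero]
    simp
    ring
  have hcand0 := cand_cost base P Q 0 hn
  push_cast at hcand0
  rw [PySem.List.pyRange_one_cons h0n, List.filter_cons, if_pos (by simp)]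
  simp only [solutionLoopB]
  rw [hcand0, hc0]
  rw [show (0 : Int) + 1 = 1 from by ring]
  have hmain := loop_eq base P Q (base.length - 1) 1 (by omega) le_rfl (costAt base P Q 0)
  rw [Nat.cast_one] at hmain
  exact hmain
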